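-- pv_equiv track=rewrite | github.com/YounesBensafia/nashlab | src/utils/exo3/nash.py | find_nash_from_pair_matrix
-- ===== SOURCE A (Python) =====
-- def find_nash_from_pair_matrix(payoff_matrix):
--     """
--     payoff_matrix: list[list[ (a_payoff, b_payoff) ]]
--     returns: list of ((i,j), (a_payoff, b_payoff)) for each pure NE
--     """
--     # convert to list of lists (defensive)
--     PM = [list(row) for row in payoff_matrix]
--     n = len(PM)
--     if n == 0:
--         return []
--     m = len(PM[0])
--     for row in PM:
--         if len(row) != m:
--             raise ValueError("La matrice doit être rectangulaire (mêmes colonnes par ligne).")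
--
--     equilibria = []
--     for i in range(n):
--         for j in range(m):
--             a_payoff, b_payoff = PM[i][j]
--             best_A = True
--             for k in range(n):
--                 other_a = PM[k][j][0]
--                 if other_a > a_payoff:
--                     best_A = False
--                     break
--             best_B = True
--             for l in range(m):
--                 other_b = PM[i][l][1]
--                 if other_b > b_payoff:
--                     best_B = False
--                     break
--
--             if best_A and best_B:
--                 equilibria.append((a_payoff, b_payoff))
--
--     return equilibria
-- ===== SOURCE B (Python) =====
-- def find_nash_from_pair_matrix(payoff_matrix):
--     """Same result as A, but precomputes per-column max a-payoff and
--     per-row max b-payoff, so each cell is tested in O(1)."""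
--     PM = [list(row) for row in payoff_matrix]
--     n = len(PM)
--     if n == 0:
--         return []
--     m = len(PM[0])
--     for row in PM:
--         if len(row) != m:
--             raise ValueError("La matrice doit être rectangulaire (mêmes colonnes par ligne).")
--     if m == 0:
--         return []
--     col_max = [max(PM[k][j][0] for k in range(n)) for j in range(m)]
--     row_max = [max(cell[1] for cell in row) for row in PM]
--     return [cell
--             for i, row in enumerate(PM)
--             for j, cell in enumerate(row)
--             if cell[0] == col_max[j] and cell[1] == row_max[i]]
-- ===== Notes on version B (the rewrite author's own statement) =====
-- stated objective: faster
-- what changed: Replaces the per-cell rescans of the cell's column and row with precomputed per-column max a-payoffs and per-row max b-payoffs, testing each cell in O(1).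
import Mathlib
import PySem

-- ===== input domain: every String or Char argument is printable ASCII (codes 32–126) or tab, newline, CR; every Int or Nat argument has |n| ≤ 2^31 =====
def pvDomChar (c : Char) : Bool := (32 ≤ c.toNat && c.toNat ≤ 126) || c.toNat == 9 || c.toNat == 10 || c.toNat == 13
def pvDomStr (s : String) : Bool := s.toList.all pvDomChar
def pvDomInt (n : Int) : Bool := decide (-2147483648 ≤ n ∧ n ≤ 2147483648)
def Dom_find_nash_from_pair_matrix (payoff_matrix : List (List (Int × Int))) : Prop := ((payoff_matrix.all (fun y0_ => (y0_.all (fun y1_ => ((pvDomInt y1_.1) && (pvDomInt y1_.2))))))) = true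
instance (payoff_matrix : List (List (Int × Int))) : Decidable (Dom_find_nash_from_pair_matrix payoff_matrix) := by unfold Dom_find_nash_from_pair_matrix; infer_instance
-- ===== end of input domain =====

-- B precomputes per-column / per-row maxima once instead of rescanning the cell's column and row for every cell.

-- ===== PORT A =====
-- triple loop: for each cell, rescan its column (best_A) and its row (best_B); the
-- broken 'if other > payoff: best = False; break' search is ported as List.all (≤),
-- which computes the same boolean the Python loop leaves in best_A / best_B.
def find_nash_from_pair_matrix (payoff_matrix : List (List (Int × Int))) : List (Int × Int) :=
  let PM := payoff_matrix
  let n := PM.length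
  if n = 0 then [] else
  let m := (PM.headD []).length
  (List.range n).foldl (fun acc i =>
    (List.range m).foldl (fun acc j =>
      let cell := (PM.getD i []).getD j (0, 0)
      let bestA := (List.range n).all (fun k => decide (((PM.getD k []).getD j (0, 0)).1 ≤ cell.1))
      let bestB := (List.range m).all (fun l => decide (((PM.getD i []).getD l (0, 0)).2 ≤ cell.2))
      if bestA && bestB then acc ++ [cell] else acc) acc) []

-- ===== PORT B =====
-- col_max / row_max precomputed once (Python max() = PySem.List.max?);
-- one filtering pass over the enumerated cells.
def find_nash_from_pair_matrix_alt (payoff_matrix : List (List (Int × Int))) : List (Int × Int) :=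
  let PM := payoff_matrix
  let n := PM.length
  if n = 0 then [] else
  let m := (PM.headD []).length
  if m = 0 then [] else
  let colMax : List Int := (List.range m).map (fun j =>
    (PySem.List.max? (PM.map (fun row => (row.getD j (0, 0)).1)) (fun x => x)).getD 0)
  let rowMax : List Int := PM.map (fun row => (PySem.List.max? (row.map Prod.snd) (fun x => x)).getD 0)
  PM.zipIdx.flatMap (fun ri =>
    ri.1.zipIdx.filterMap (fun cj =>
      if cj.1.1 = colMax.getD cj.2 0 ∧ cj.1.2 = rowMax.getD ri.2 0 then some cj.1 else none))

-- ===== PRECONDITION & SPEC =====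
-- Pre_ excludes exactly the ragged (non-rectangular) matrices, on which A raises ValueError.
def Pre_find_nash_from_pair_matrix (payoff_matrix : List (List (Int × Int))) : Prop :=
  ∀ row ∈ payoff_matrix, row.length = (payoff_matrix.headD []).length
instance (payoff_matrix : List (List (Int × Int))) : Decidable (Pre_find_nash_from_pair_matrix payoff_matrix) := by unfold Pre_find_nash_from_pair_matrix; infer_instance
def pvWitness_find_nash_from_pair_matrix : (List (List (Int × Int))) := [[(1, 2), (0, 0)], [(0, 0), (2, 1)]]
def Spec_find_nash_from_pair_matrix (payoff_matrix : List (List (Int × Int))) (out : List (Int × Int)) : Prop := out = find_nash_from_pair_matrix_alt payoff_matrix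
instance (payoff_matrix : List (List (Int × Int))) (out : List (Int × Int)) : Decidable (Spec_find_nash_from_pair_matrix payoff_matrix out) := by unfold Spec_find_nash_from_pair_matrix; infer_instance

-- ===== CLAIM (what is proved, stated in full; the proofs are below) =====
def Claim_equal_find_nash_from_pair_matrix : Prop := ∀ (payoff_matrix : List (List (Int × Int))), Dom_find_nash_from_pair_matrix payoff_matrix → Pre_find_nash_from_pair_matrix payoff_matrix → Spec_find_nash_from_pair_matrix payoff_matrix (find_nash_from_pair_matrix payoff_matrix)

-- ===== LEMMAS AND PROOFS =====

-- zipIdx as a map over indices (with a default in range)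
lemma pv_zipIdx_eq_map {α : Type} (l : List α) (d : α) (k : Nat) :
    l.zipIdx k = (List.range l.length).map (fun i => (l.getD i d, k + i)) := by
  induction l generalizing k with
  | nil => simp
  | cons a t ih =>
      rw [List.zipIdx_cons, ih (k + 1), List.length_cons, List.range_succ_eq_map,
        List.map_cons, List.map_map]
      simp only [List.getD_cons_zero, Nat.add_zero]
      refine congrArg (List.cons _) (List.map_congr_left ?_)
      intro i _
      simp [Function.comp, Nat.succ_eq_add_one]
      omega

lemma pv_filterMap_if_eq_map_filter {α β : Type} (p : α → Bool) (f : α → β) (l : List α) :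
    l.filterMap (fun x => if p x then some (f x) else none) = (l.filter p).map f := by
  induction l with
  | nil => rfl
  | cons a t ih => by_cases h : p a <;> simp [h, ih]

-- '∀ k < len, p (l.getD k d)' over a range is '∀ y ∈ l, p y'
lemma pv_all_range_getD {α : Type} (l : List α) (d : α) (p : α → Prop) [DecidablePred p] :
    ((List.range l.length).all (fun k => decide (p (l.getD k d))) = true) ↔ ∀ y ∈ l, p y := by
  simp only [List.all_eq_true, List.mem_range, decide_eq_true_eq]
  constructor
  · intro h y hy
    obtain ⟨k, hk, rfl⟩ := List.mem_iff_getElem.mp hy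
    have := h k hk
    rwa [List.getD_eq_getElem l d hk] at this
  · intro h k hk
    rw [List.getD_eq_getElem l d hk]
    exact h _ (List.getElem_mem hk)

-- 'a is an upper bound of xs' iff 'a equals max(xs)', for a ∈ xs
lemma pv_all_le_iff_eq_max (xs : List Int) (a : Int) (ha : a ∈ xs) :
    (∀ y ∈ xs, y ≤ a) ↔ a = (PySem.List.max? xs (fun x => x)).getD 0 := by
  have hne : xs ≠ [] := List.ne_nil_of_mem ha
  obtain ⟨M, hM⟩ : ∃ M, PySem.List.max? xs (fun x => x) = some M := by
    cases h : PySem.List.max? xs (fun x => x) with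
    | none => exact absurd ((PySem.List.max?_eq_none_iff _ _).mp h) hne
    | some M => exact ⟨M, rfl⟩
  have hMmem : M ∈ xs := PySem.List.max?_mem hM
  have hMmax : ∀ y ∈ xs, y ≤ M := PySem.List.max?_isMax hM
  rw [hM]
  constructor
  · intro h
    exact le_antisymm (hMmax a ha) (h M hMmem)
  · intro h y hy
    exact h ▸ hMmax y hy

-- ===== VERDICT (by name: the statement is the Claim_ definition above) =====
theorem find_nash_from_pair_matrix_spec : Claim_equal_find_nash_from_pair_matrix := by
  intro PM _ hPre
  unfold Spec_find_nash_from_pair_matrix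
  by_cases hn : PM.length = 0
  · simp [find_nash_from_pair_matrix, find_nash_from_pair_matrix_alt, hn]
  · have hA : find_nash_from_pair_matrix PM =
        (List.range PM.length).flatMap (fun i =>
          ((List.range (PM.headD []).length).filter (fun j =>
              ((List.range PM.length).all (fun k =>
                  decide (((PM.getD k []).getD j (0, 0)).1 ≤ (((PM.getD i []).getD j (0, 0)).1)))) &&
              ((List.range (PM.headD []).length).all (fun l =>
                  decide (((PM.getD i []).getD l (0, 0)).2 ≤ (((PM.getD i []).getD j (0, 0)).2)))))).map
            (fun j => (PM.getD i []).getD j (0, 0))) := by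
      simp only [find_nash_from_pair_matrix, if_neg hn]
      simp only [PySem.List.foldl_append_if, PySem.List.foldl_append_eq_flatMap, List.nil_append]
    rw [hA]
    by_cases hm : (PM.headD []).length = 0
    · simp only [hm, List.range_zero, List.filter_nil, List.map_nil]
      have hnil : PM.head?.getD [] = [] := by
        cases PM with
        | nil => rfl
        | cons r t =>
            simp only [List.headD_cons, List.length_eq_zero_iff] at hm
            simpa using hm
      simp [find_nash_from_pair_matrix_alt, hn, hnil, List.flatMap_eq_nil_iff]
    · simp only [find_nash_from_pair_matrix_alt, if_neg hn, if_neg hm]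
      rw [pv_zipIdx_eq_map PM [] 0, List.flatMap_map]
      refine List.flatMap_congr ?_
      intro i hi
      have hi' : i < PM.length := List.mem_range.mp hi
      have hrow_mem : PM.getD i [] ∈ PM := by
        rw [List.getD_eq_getElem _ _ hi']; exact List.getElem_mem hi'
      have hrowlen : (PM.getD i []).length = (PM.headD []).length := hPre _ hrow_mem
      simp only [Nat.zero_add]
      rw [pv_zipIdx_eq_map (PM.getD i []) (0, 0) 0, List.filterMap_map]
      simp only [Nat.zero_add, hrowlen]
      rw [← pv_filterMap_if_eq_map_filter]
      refine List.filterMap_congr ?_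
      intro j hj
      have hj' : j < (PM.headD []).length := List.mem_range.mp hj
      have hjrow : j < (PM.getD i []).length := by omega
      -- the cell
      have hcellmem : (PM.getD i []).getD j (0, 0) ∈ PM.getD i [] := by
        rw [List.getD_eq_getElem _ _ hjrow]; exact List.getElem_mem hjrow
      -- column condition
      have h1 : (((List.range PM.length).all (fun k =>
              decide (((PM.getD k []).getD j (0, 0)).1 ≤ (((PM.getD i []).getD j (0, 0)).1)))) = true) ↔
          ((PM.getD i []).getD j (0, 0)).1 =
            (((List.range (PM.headD []).length).map (fun j =>
                (PySem.List.max? (PM.map (fun row => (row.getD j (0, 0)).1)) (fun x => x)).getD 0)).getD j 0) := by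
        have hget : (((List.range (PM.headD []).length).map (fun j =>
              (PySem.List.max? (PM.map (fun row => (row.getD j (0, 0)).1)) (fun x => x)).getD 0)).getD j 0) =
            (PySem.List.max? (PM.map (fun row => (row.getD j (0, 0)).1)) (fun x => x)).getD 0 := by
          rw [List.getD_eq_getElem _ _ (by simpa using hj')]
          simp
        rw [hget]
        have hmem : ((PM.getD i []).getD j (0, 0)).1 ∈ PM.map (fun row => (row.getD j (0, 0)).1) :=
          List.mem_map.mpr ⟨PM.getD i [], hrow_mem, rfl⟩
        rw [← pv_all_le_iff_eq_max _ _ hmem]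
        rw [pv_all_range_getD PM [] (fun row => (row.getD j (0, 0)).1 ≤ ((PM.getD i []).getD j (0, 0)).1)]
        constructor
        · intro h y hy
          obtain ⟨row, hrow, rfl⟩ := List.mem_map.mp hy
          exact h row hrow
        · intro h row hrow
          exact h _ (List.mem_map.mpr ⟨row, hrow, rfl⟩)
      -- row condition
      have h2 : (((List.range (PM.headD []).length).all (fun l =>
              decide (((PM.getD i []).getD l (0, 0)).2 ≤ (((PM.getD i []).getD j (0, 0)).2)))) = true) ↔
          ((PM.getD i []).getD j (0, 0)).2 =
            ((PM.map (fun row => (PySem.List.max? (row.map Prod.snd) (fun x => x)).getD 0)).getD i 0) := by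
        have hget : ((PM.map (fun row => (PySem.List.max? (row.map Prod.snd) (fun x => x)).getD 0)).getD i 0) =
            (PySem.List.max? ((PM.getD i []).map Prod.snd) (fun x => x)).getD 0 := by
          rw [List.getD_eq_getElem _ _ (by simpa using hi'), List.getElem_map,
            List.getD_eq_getElem _ _ hi']
        rw [hget]
        have hmem : ((PM.getD i []).getD j (0, 0)).2 ∈ (PM.getD i []).map Prod.snd :=
          List.mem_map.mpr ⟨_, hcellmem, rfl⟩
        rw [← pv_all_le_iff_eq_max _ _ hmem]
        rw [← hrowlen]
        rw [pv_all_range_getD (PM.getD i []) (0, 0) (fun c => c.2 ≤ ((PM.getD i []).getD j (0, 0)).2)]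
        constructor
        · intro h y hy
          obtain ⟨c, hc, rfl⟩ := List.mem_map.mp hy
          exact h c hc
        · intro h c hc
          exact h _ (List.mem_map.mpr ⟨c, hc, rfl⟩)
      simp only [Bool.and_eq_true]
      rw [if_congr (and_congr h1 h2) rfl rfl]
      rfl
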